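-- pv_equiv track=rewrite | github.com/Darjotri/Ioet_callenge | controller.py | office_occurrency
-- ===== SOURCE A (Python) =====
-- def calculate_occurrencies(schedule_worker1, schedule_worker2):
--     intersect=list(set(schedule_worker1).intersection(schedule_worker2))
--     return len(intersect)
--
-- def office_occurrency(dictionary):
--     occurrency={}
--     workers=list(dictionary.keys())
--     schedule=list(dictionary.values())
--     for i in range(len(workers)):
--         for j in range(i+1,len(workers)):
--             try:
--                 occurrency[str(workers[i])+"-"+str(workers[j])]=calculate_occurrencies(schedule[i],schedule[j])
--             except:
--                 pass
--     return occurrency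
-- ===== SOURCE B (Python) =====
-- def office_occurrency(dictionary):
--     names = [str(w) for w in dictionary]
--     sets = [set(s) for s in dictionary.values()]
--     occ = {a + "-" + b: 0 for k, a in enumerate(names) for b in names[k + 1:]}
--     index = {}
--     for i, s in enumerate(sets):
--         for v in s:
--             index.setdefault(v, []).append(i)
--     for ids in index.values():
--         for x in range(len(ids)):
--             for y in range(x + 1, len(ids)):
--                 occ[names[ids[x]] + "-" + names[ids[y]]] += 1
--     return occ
-- ===== Notes on version B (the rewrite author's own statement) =====
-- stated objective: alternative
-- what changed: Instead of rebuilding both schedules' sets for every worker pair, B precomputes each worker's distinct-schedule set once, initialises every ordered pair's 'wi-wj' counter to 0, and builds an inverted index value->owning workers, incrementing each owner pair once per shared distinct value.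
import Mathlib
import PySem

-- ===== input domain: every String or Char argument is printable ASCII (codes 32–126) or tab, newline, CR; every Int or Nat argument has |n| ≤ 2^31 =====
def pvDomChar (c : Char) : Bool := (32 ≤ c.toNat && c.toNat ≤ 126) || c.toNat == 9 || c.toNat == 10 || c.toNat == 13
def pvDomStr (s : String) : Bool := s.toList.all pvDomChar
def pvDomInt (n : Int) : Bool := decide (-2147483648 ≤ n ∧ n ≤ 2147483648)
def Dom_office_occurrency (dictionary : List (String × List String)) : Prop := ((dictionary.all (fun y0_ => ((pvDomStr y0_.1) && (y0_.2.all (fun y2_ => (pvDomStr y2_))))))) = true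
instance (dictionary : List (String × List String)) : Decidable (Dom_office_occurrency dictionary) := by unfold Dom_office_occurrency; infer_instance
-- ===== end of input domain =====

-- B replaces A's per-pair set rebuilding with one dict of pairs initialised to 0 plus an inverted
-- index value -> owning workers, incrementing each owner pair once per shared distinct value (alternative decomposition).

-- ===== PORT A =====
-- len(list(set(s1).intersection(s2))): on list-of-str arguments set() never raises, so A's
-- try/except never fires and is not ported; str() on a str is the identity.
def pvCalcOccurrencies (schedule_worker1 schedule_worker2 : List String) : Int :=
  ((PySem.Set.inter (PySem.Set.ofList schedule_worker1) schedule_worker2).length : Int)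

-- the Python argument is a dict: duplicate keys in the association list collapse (last value wins),
-- which PySem.Dict.ofList performs; range indices are always in range, so xs[i] is pyGetD.
def office_occurrency (dictionary : List (String × List String)) : List (String × Int) :=
  let d := PySem.Dict.ofList dictionary
  let workers := PySem.Dict.keys d
  let schedule := PySem.Dict.values d
  let occ : PySem.Dict String Int :=
    (PySem.List.pyRange 0 (workers.length : Int)).foldl (fun occ i =>
      (PySem.List.pyRange (i + 1) (workers.length : Int)).foldl (fun occ j =>
        occ.insert (PySem.List.pyGetD workers i "" ++ "-" ++ PySem.List.pyGetD workers j "")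
          (pvCalcOccurrencies (PySem.List.pyGetD schedule i []) (PySem.List.pyGetD schedule j []))) occ)
      PySem.Dict.empty
  occ.items

-- ===== PORT B =====
-- transliteration of Source B; occ[...] += 1 is modify with default 0 (the key is provably present).
def office_occurrency_alt (dictionary : List (String × List String)) : List (String × Int) :=
  let d := PySem.Dict.ofList dictionary
  let names := PySem.Dict.keys d
  let sets := (PySem.Dict.values d).map (fun s => PySem.Set.ofList s)
  let occ0 : PySem.Dict String Int :=
    (PySem.List.enumerate names).foldl (fun occ p =>
      (PySem.List.slice names (some (p.1 + 1))).foldl (fun occ b =>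
        occ.insert (p.2 ++ "-" ++ b) 0) occ) PySem.Dict.empty
  let index : PySem.Dict String (List Int) :=
    (PySem.List.enumerate sets).foldl (fun ix p =>
      p.2.foldl (fun ix v => ix.modify v [] (fun l => l ++ [p.1])) ix) PySem.Dict.empty
  let occ : PySem.Dict String Int :=
    (PySem.Dict.values index).foldl (fun occ ids =>
      (PySem.List.pyRange 0 (ids.length : Int)).foldl (fun occ x =>
        (PySem.List.pyRange (x + 1) (ids.length : Int)).foldl (fun occ y =>
          occ.modify (PySem.List.pyGetD names (PySem.List.pyGetD ids x 0) "" ++ "-" ++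
                      PySem.List.pyGetD names (PySem.List.pyGetD ids y 0) "") 0 (fun c => c + 1)) occ) occ) occ0
  occ.items

-- ===== PRECONDITION & SPEC =====
def pvPairLabels (names : List String) : List String :=
  (List.range names.length).flatMap (fun i =>
    ((List.range names.length).drop (i + 1)).map (fun j => names.getD i "" ++ "-" ++ names.getD j ""))

-- Pre_ excludes dictionaries where two different worker pairs produce the same "wi-wj" label
-- (possible only when a worker name itself contains '-'): there A silently overwrites one pair's
-- count with the other's, an accident of the shared dict key.
def Pre_office_occurrency (dictionary : List (String × List String)) : Prop :=
  (pvPairLabels (PySem.Dict.keys (PySem.Dict.ofList dictionary))).Nodup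
instance (dictionary : List (String × List String)) : Decidable (Pre_office_occurrency dictionary) := by
  unfold Pre_office_occurrency; infer_instance

def pvWitness_office_occurrency : (List (String × List String)) :=
  [("a", ["x", "y"]), ("b", ["y"]), ("c", ["z", "x"])]

def Spec_office_occurrency (dictionary : List (String × List String)) (out : List (String × Int)) : Prop := out = office_occurrency_alt dictionary
instance (dictionary : List (String × List String)) (out : List (String × Int)) : Decidable (Spec_office_occurrency dictionary out) := by unfold Spec_office_occurrency; infer_instance

-- ===== CLAIM (what is proved, stated in full; the proofs are below) =====
def Claim_equal_office_occurrency : Prop := ∀ (dictionary : List (String × List String)), Dom_office_occurrency dictionary → Pre_office_occurrency dictionary → Spec_office_occurrency dictionary (office_occurrency dictionary)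

-- ===== LEMMAS AND PROOFS =====

-- all ordered index pairs i < j < n, in A's iteration order
def pvIdxPairs (n : Nat) : List (Nat × Nat) :=
  (List.range n).flatMap (fun i => ((List.range n).drop (i + 1)).map (fun j => (i, j)))

def pvLbl (names : List String) (p : Nat × Nat) : String :=
  names.getD p.1 "" ++ "-" ++ names.getD p.2 ""

-- all ordered element pairs of a list (earlier element first)
def pvPairsOf {α : Type} : List α → List (α × α)
  | [] => []
  | a :: t => t.map (fun b => (a, b)) ++ pvPairsOf t

lemma pv_foldl_flatMap {α β γ : Type} (l : List α) (g : α → List β) (f : γ → β → γ) (init : γ) :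
    (l.flatMap g).foldl f init = l.foldl (fun acc x => (g x).foldl f acc) init := by
  induction l generalizing init with
  | nil => rfl
  | cons a t ih => simp [List.flatMap_cons, List.foldl_append, ih]

lemma pv_pyRange_empty {a b : Int} (h : b ≤ a) : PySem.List.pyRange a b = [] := by
  rw [List.eq_nil_iff_forall_not_mem]
  intro x hx
  rw [PySem.List.mem_pyRange_one] at hx
  omega

lemma pv_pyRange_cast (a b : Nat) :
    PySem.List.pyRange (a : Int) (b : Int) = ((List.range b).drop a).map (fun (k : Nat) => (k : Int)) := by
  induction hfuel : b - a generalizing a with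
  | zero =>
    rw [pv_pyRange_empty (by exact_mod_cast Nat.le_of_sub_eq_zero hfuel),
      List.drop_eq_nil_of_le (by simpa using Nat.le_of_sub_eq_zero hfuel), List.map_nil]
  | succ k ih =>
    have hab : a < b := by omega
    rw [PySem.List.pyRange_one_cons (by exact_mod_cast hab)]
    have h1 : ((a : Int) + 1) = ((a + 1 : Nat) : Int) := by push_cast; ring
    rw [h1, ih (a + 1) (by omega)]
    conv_rhs => rw [List.drop_eq_getElem_cons (by simpa using hab), List.getElem_range,
      List.map_cons]

lemma pv_drop_range_eq (n k : Nat) : (List.range n).drop k = List.range' k (n - k) := by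
  apply List.ext_getElem
  · simp
  · intro i h1 h2
    simp [List.getElem_drop, List.getElem_range, List.getElem_range']

lemma pv_mem_idxPairs (n : Nat) (p : Nat × Nat) :
    p ∈ pvIdxPairs n ↔ p.1 < p.2 ∧ p.2 < n := by
  obtain ⟨i, j⟩ := p
  simp only [pvIdxPairs, List.mem_flatMap, List.mem_map, pv_drop_range_eq,
    List.mem_range, List.mem_range'_1, Prod.mk.injEq]
  constructor
  · rintro ⟨a, ha, b, hb, rfl, rfl⟩
    omega
  · rintro ⟨h1, h2⟩
    exact ⟨i, by omega, j, by omega, rfl, rfl⟩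

lemma pv_double_fold {γ : Type} (n : Nat) (F : γ → Int → Int → γ) (init : γ) :
    (PySem.List.pyRange 0 (n : Int)).foldl (fun acc i =>
      (PySem.List.pyRange (i + 1) (n : Int)).foldl (fun acc j => F acc i j) acc) init
    = (pvIdxPairs n).foldl (fun acc p => F acc (p.1 : Int) (p.2 : Int)) init := by
  conv_rhs => rw [pvIdxPairs, pv_foldl_flatMap]
  have h0 : (0 : Int) = ((0 : Nat) : Int) := by norm_num
  rw [h0, pv_pyRange_cast 0 n, List.drop_zero, List.foldl_map]
  apply PySem.List.foldl_congr_mem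
  intro acc i _
  have hcast : ((i : Int) + 1) = ((i + 1 : Nat) : Int) := by push_cast; ring
  rw [hcast, pv_pyRange_cast (i + 1) n, List.foldl_map, List.foldl_map]

lemma pv_drop_eq_map_range {α : Type} (l : List α) (d : α) (k : Nat) :
    l.drop k = ((List.range l.length).drop k).map (fun j => l.getD j d) := by
  apply List.ext_getElem
  · simp
  · intro i h1 h2
    have hki : k + i < l.length := by
      simp only [List.length_drop] at h1; omega
    simp [List.getElem_drop, List.getElem_range, List.getD_eq_getElem?_getD,
      List.getElem?_eq_getElem hki]

lemma pv_idxPairs_map_getD {α : Type} (l : List α) (d : α) :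
    (pvIdxPairs l.length).map (fun q => (l.getD q.1 d, l.getD q.2 d)) = pvPairsOf l := by
  induction l with
  | nil => rfl
  | cons a t ih =>
    have hstep : pvIdxPairs (t.length + 1)
        = ((List.range t.length).map (fun j => (0, j + 1)))
          ++ (pvIdxPairs t.length).map (fun q => (q.1 + 1, q.2 + 1)) := by
      rw [pvIdxPairs, List.range_succ_eq_map, List.flatMap_cons, List.flatMap_map]
      congr 1
      · simp only [List.drop_succ_cons, List.drop_zero, List.map_map]
        rfl
      · rw [pvIdxPairs, List.map_flatMap]
        congr 1
        funext i
        simp only [List.drop_succ_cons, ← List.map_drop, List.map_map]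
        rfl
    show (pvIdxPairs (t.length + 1)).map _ = _
    rw [hstep, List.map_append, List.map_map, List.map_map]
    rw [pvPairsOf]
    -- congr 1 closes the shifted second component against ih (up to defeq)
    congr 1
    conv_rhs => rw [show t = (List.range t.length).map (fun j => t.getD j d) from by
      simpa using pv_drop_eq_map_range t d 0]
    rw [List.map_map]
    rfl

lemma pv_mem_pairsOf (l : List Nat) (hl : l.Pairwise (· < ·)) (q : Nat × Nat) (hq : q ∈ pvPairsOf l) :
    q.1 ∈ l ∧ q.2 ∈ l ∧ q.1 < q.2 := by
  induction l with
  | nil => simp [pvPairsOf] at hq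
  | cons a t ih =>
    rw [List.pairwise_cons] at hl
    simp only [pvPairsOf, List.mem_append, List.mem_map] at hq
    rcases hq with ⟨b, hb, rfl⟩ | hq
    · exact ⟨by simp, by simp [hb], hl.1 b hb⟩
    · obtain ⟨h1, h2, h3⟩ := ih hl.2 hq
      exact ⟨by simp [h1], by simp [h2], h3⟩

lemma pv_count_pairsOf (l : List Nat) (hl : l.Pairwise (· < ·)) (i j : Nat) (hij : i < j) :
    (pvPairsOf l).count (i, j) = if i ∈ l ∧ j ∈ l then 1 else 0 := by
  induction l with
  | nil => simp [pvPairsOf]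
  | cons a t ih =>
    rw [List.pairwise_cons] at hl
    have hnd : t.Nodup := List.Pairwise.imp (fun h => Nat.ne_of_lt h) hl.2
    rw [pvPairsOf, List.count_append, ih hl.2]
    rcases eq_or_ne a i with rfl | hai
    · have hit : a ∉ t := fun hmem => absurd (hl.1 a hmem) (lt_irrefl a)
      have hja : j ≠ a := by omega
      have hcm : (t.map (fun b => (a, b))).count (a, j) = t.count j :=
        List.count_map_of_injective t (fun b => (a, b))
          (fun x y hxy => by simpa using hxy) j
      rw [hcm]
      by_cases hjt : j ∈ t
      · rw [List.count_eq_one_of_mem hnd hjt]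
        simp [hit, hjt]
      · rw [List.count_eq_zero.mpr hjt]
        simp [hit, hjt, hja]
    · have hc0 : (t.map (fun b => (a, b))).count (i, j) = 0 := by
        rw [List.count_eq_zero]
        intro hmem
        obtain ⟨b, _, hb⟩ := List.mem_map.mp hmem
        exact hai (congrArg Prod.fst hb)
      rw [hc0]
      rcases eq_or_ne j a with rfl | hja
      · have hjt : j ∉ t := fun hmem => absurd (hl.1 j hmem) (lt_irrefl j)
        have hit : i ∉ t := fun hmem => by
          have := hl.1 i hmem; omega
        simp [hjt, hit, Nat.ne_of_lt hij]
      · have hia : i ≠ a := Ne.symm hai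
        simp [List.mem_cons, hia, hja]

lemma pv_set_update_eq_self {α : Type} [BEq α] [LawfulBEq α] (s : PySem.Set α) (xs : List α)
    (h : ∀ x ∈ xs, x ∈ s) : PySem.Set.update s xs = s := by
  induction xs generalizing s with
  | nil => rfl
  | cons x t ih =>
    have hx : PySem.Set.add s x = s := by
      simp only [PySem.Set.add, PySem.Set.contains]
      rw [if_pos]
      simp [h x (by simp)]
    show PySem.Set.update (PySem.Set.add s x) t = s
    rw [hx]
    exact ih s (fun y hy => h y (by simp [hy]))

lemma pv_flatMap_ite_singleton {α : Type} (l : List Nat) (P : Nat → Bool) (f : Nat → α) :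
    l.flatMap (fun i => if P i then [f i] else []) = (l.filter P).map f := by
  induction l with
  | nil => rfl
  | cons a t ih =>
    by_cases h : P a <;> simp [List.flatMap_cons, h, ih]

lemma pv_sum_ite_one_zero (l : List String) (P : String → Bool) :
    (l.map (fun v => if P v then (1 : Nat) else 0)).sum = l.countP P := by
  induction l with
  | nil => rfl
  | cons a t ih =>
    by_cases h : P a <;> simp [h, ih, Nat.add_comm]

lemma pv_enumerate_eq {α : Type} (d : α) (xs : List α) (s : Int) :
    PySem.List.enumerate xs s
      = (List.range xs.length).map (fun (k : Nat) => ((s + (k : Int), xs.getD k d) : Int × α)) := by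
  induction xs generalizing s with
  | nil => rfl
  | cons a t ih =>
    rw [PySem.List.enumerate, List.length_cons, List.range_succ_eq_map, List.map_cons, ih (s + 1),
      List.map_map]
    congr 1
    · simp
    · apply List.map_congr_left
      intro k _
      simp only [Function.comp_def, List.getD_cons_succ]
      congr 1
      push_cast
      ring

lemma pv_count_map_eq {α : Type} [DecidableEq α] (m : List (Nat × Nat)) (f : (Nat × Nat) → α)
    (p : Nat × Nat) (hinj : ∀ q ∈ m, f q = f p → q = p) :
    (m.map f).count (f p) = m.count p := by
  induction m with
  | nil => rfl
  | cons q t ih =>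
    rw [List.map_cons, List.count_cons, List.count_cons,
      ih (fun r hr => hinj r (by simp [hr]))]
    congr 1
    by_cases hq : q = p
    · subst hq; simp
    · have : f q ≠ f p := fun hf => hq (hinj q (by simp) hf)
      simp [hq, this]

lemma pv_occ0_char (nm : List String) :
    (PySem.List.enumerate nm).foldl (fun occ p =>
      (PySem.List.slice nm (some (p.1 + 1))).foldl (fun occ b =>
        occ.insert (p.2 ++ "-" ++ b) (0 : Int)) occ) PySem.Dict.empty
    = (pvIdxPairs nm.length).foldl (fun occ p =>
        occ.insert (nm.getD p.1 "" ++ "-" ++ nm.getD p.2 "") (0 : Int)) PySem.Dict.empty := by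
  rw [pv_enumerate_eq "" nm 0, List.foldl_map]
  conv_rhs => rw [pvIdxPairs, pv_foldl_flatMap]
  apply PySem.List.foldl_congr_mem
  intro acc k _
  have h1 : (0 + (k : Int) + 1) = ((k + 1 : Nat) : Int) := by push_cast; ring
  rw [h1, PySem.List.slice_from nm (by exact_mod_cast Nat.zero_le _), Int.toNat_natCast,
    pv_drop_eq_map_range nm "" (k + 1), List.foldl_map, List.foldl_map]

lemma pv_index_char (sets : List (PySem.Set String)) :
    (PySem.List.enumerate sets).foldl (fun ix p =>
      p.2.foldl (fun ix v => ix.modify v [] (fun l => l ++ [p.1])) ix)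
      (PySem.Dict.empty : PySem.Dict String (List Int))
    = ((List.range sets.length).flatMap (fun i => (sets.getD i []).map (fun v => (v, (i : Int))))).foldl
        (fun ix q => ix.modify q.1 [] (fun l => l ++ [q.2])) PySem.Dict.empty := by
  rw [pv_enumerate_eq [] sets 0, List.foldl_map, pv_foldl_flatMap]
  apply PySem.List.foldl_congr_mem
  intro acc i _
  rw [List.foldl_map]
  simp only [zero_add]

lemma pv_final_char (nm : List String) (vals : List (List Int)) (occ0 : PySem.Dict String Int) :
    vals.foldl (fun occ ids =>
      (PySem.List.pyRange 0 (ids.length : Int)).foldl (fun occ x =>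
        (PySem.List.pyRange (x + 1) (ids.length : Int)).foldl (fun occ y =>
          occ.modify (PySem.List.pyGetD nm (PySem.List.pyGetD ids x 0) "" ++ "-" ++
                      PySem.List.pyGetD nm (PySem.List.pyGetD ids y 0) "") 0 (fun c => c + 1)) occ) occ) occ0
    = (vals.flatMap (fun ids => (pvIdxPairs ids.length).map (fun q =>
        PySem.List.pyGetD nm (ids.getD q.1 0) "" ++ "-" ++ PySem.List.pyGetD nm (ids.getD q.2 0) ""))).foldl
        (fun occ k => occ.modify k 0 (fun c => c + 1)) occ0 := by
  rw [pv_foldl_flatMap]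
  apply PySem.List.foldl_congr_mem
  intro acc ids _
  rw [pv_double_fold ids.length (fun occ x y =>
      occ.modify (PySem.List.pyGetD nm (PySem.List.pyGetD ids x 0) "" ++ "-" ++
                  PySem.List.pyGetD nm (PySem.List.pyGetD ids y 0) "") 0 (fun c => c + 1)) acc,
    List.foldl_map]
  apply PySem.List.foldl_congr_mem
  intro acc2 q _
  rw [PySem.List.pyGetD_natCast, PySem.List.pyGetD_natCast]

lemma pv_ids_char (sets : List (PySem.Set String)) (hnodS : ∀ i : Nat, (sets.getD i []).Nodup)
    (v : String) :
    (((List.range sets.length).flatMap (fun i => (sets.getD i []).map (fun w => (w, (i : Int))))).filter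
        (fun q => q.1 == v)).map (fun x => x.2)
    = ((List.range sets.length).filter (fun i => decide (v ∈ sets.getD i []))).map
        (fun (i : Nat) => (i : Int)) := by
  rw [List.filter_flatMap, List.map_flatMap]
  have hinner : ∀ i : Nat,
      ((((sets.getD i []).map (fun w => (w, (i : Int)))).filter (fun q => q.1 == v)).map (fun x => x.2))
      = if decide (v ∈ sets.getD i []) then [(i : Int)] else [] := by
    intro i
    rw [List.filter_map]
    have hcomp : ((fun (q : String × Int) => q.1 == v) ∘ (fun w => (w, (i : Int)))) = (fun w => w == v) := rfl
    rw [hcomp, List.filter_beq]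
    by_cases hv : v ∈ sets.getD i []
    · rw [List.count_eq_one_of_mem (hnodS i) hv]
      have hv' : v ∈ sets[i]?.getD [] := by rwa [List.getD_eq_getElem?_getD] at hv
      simp [hv']
    · rw [List.count_eq_zero.mpr hv]
      have hv' : ¬ v ∈ sets[i]?.getD [] := by rwa [List.getD_eq_getElem?_getD] at hv
      simp [hv']
  calc (List.range sets.length).flatMap (fun i =>
          ((((sets.getD i []).map (fun w => (w, (i : Int)))).filter (fun q => q.1 == v)).map (fun x => x.2)))
      = (List.range sets.length).flatMap (fun i => if decide (v ∈ sets.getD i []) then [(i : Int)] else []) := by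
        congr 1
        funext i
        exact hinner i
    _ = _ := pv_flatMap_ite_singleton _ _ _

lemma pv_core (nm : List String) (sc : List (List String))
    (hlen : sc.length = nm.length)
    (hnd : (pvPairLabels nm).Nodup) :
    ((PySem.List.pyRange 0 (nm.length : Int)).foldl (fun occ i =>
        (PySem.List.pyRange (i + 1) (nm.length : Int)).foldl (fun occ j =>
          occ.insert (PySem.List.pyGetD nm i "" ++ "-" ++ PySem.List.pyGetD nm j "")
            (pvCalcOccurrencies (PySem.List.pyGetD sc i []) (PySem.List.pyGetD sc j []))) occ)
        (PySem.Dict.empty : PySem.Dict String Int)).items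
    = ((PySem.Dict.values
          ((PySem.List.enumerate (sc.map (fun s => PySem.Set.ofList s))).foldl (fun ix p =>
            p.2.foldl (fun ix v => ix.modify v [] (fun l => l ++ [p.1])) ix)
            (PySem.Dict.empty : PySem.Dict String (List Int)))).foldl (fun occ ids =>
        (PySem.List.pyRange 0 (ids.length : Int)).foldl (fun occ x =>
          (PySem.List.pyRange (x + 1) (ids.length : Int)).foldl (fun occ y =>
            occ.modify (PySem.List.pyGetD nm (PySem.List.pyGetD ids x 0) "" ++ "-" ++
                        PySem.List.pyGetD nm (PySem.List.pyGetD ids y 0) "") 0 (fun c => c + 1)) occ) occ)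
        ((PySem.List.enumerate nm).foldl (fun occ p =>
          (PySem.List.slice nm (some (p.1 + 1))).foldl (fun occ b =>
            occ.insert (p.2 ++ "-" ++ b) (0 : Int)) occ)
          (PySem.Dict.empty : PySem.Dict String Int))).items := by
  have hempty : (PySem.Dict.empty : PySem.Dict String Int).items = ([] : List (String × Int)) := rfl
  have hlblnd : ((pvIdxPairs nm.length).map
      (fun p => nm.getD p.1 "" ++ "-" ++ nm.getD p.2 "")).Nodup := by
    have hpl : pvPairLabels nm
        = (pvIdxPairs nm.length).map (fun p => nm.getD p.1 "" ++ "-" ++ nm.getD p.2 "") := by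
      rw [pvPairLabels, pvIdxPairs, List.map_flatMap]
      congr 1
      funext i
      rw [List.map_map]
      rfl
    rwa [hpl] at hnd
  -- ===== A side: one flat insert loop over the ordered index pairs =====
  rw [pv_double_fold nm.length (fun occ i j =>
      occ.insert (PySem.List.pyGetD nm i "" ++ "-" ++ PySem.List.pyGetD nm j "")
        (pvCalcOccurrencies (PySem.List.pyGetD sc i []) (PySem.List.pyGetD sc j []))) PySem.Dict.empty]
  simp only [PySem.List.pyGetD_natCast]
  rw [PySem.Dict.items_foldl_insert_fresh (pvIdxPairs nm.length)
      (fun p => nm.getD p.1 "" ++ "-" ++ nm.getD p.2 "")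
      (fun p => pvCalcOccurrencies (sc.getD p.1 []) (sc.getD p.2 []))
      PySem.Dict.empty (fun a _ => PySem.Dict.contains_empty _) hlblnd, hempty, List.nil_append]
  -- ===== B side: canonical forms =====
  rw [pv_occ0_char nm, pv_index_char (sc.map (fun s => PySem.Set.ofList s)), pv_final_char nm]
  set sets := sc.map (fun s => PySem.Set.ofList s) with hsetsdef
  set occ0 := (pvIdxPairs nm.length).foldl (fun occ p =>
      occ.insert (nm.getD p.1 "" ++ "-" ++ nm.getD p.2 "") (0 : Int)) PySem.Dict.empty with hocc0
  set index := ((List.range sets.length).flatMap (fun i =>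
      (sets.getD i []).map (fun v => (v, (i : Int))))).foldl
      (fun ix q => ix.modify q.1 [] (fun l => l ++ [q.2])) PySem.Dict.empty with hindex
  set M := (PySem.Dict.values index).flatMap (fun ids => (pvIdxPairs ids.length).map (fun q =>
      PySem.List.pyGetD nm (ids.getD q.1 0) "" ++ "-" ++
      PySem.List.pyGetD nm (ids.getD q.2 0) "")) with hM
  have hS : ∀ i : Nat, sets.getD i [] = PySem.Set.ofList (sc.getD i []) := fun i =>
    List.getD_map sc [] (fun s => PySem.Set.ofList s)
  have hnodS : ∀ i : Nat, (sets.getD i []).Nodup := fun i => by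
    rw [hS i]; exact PySem.Set.nodup_ofList _
  have hsetsl : sets.length = nm.length := by rw [hsetsdef, List.length_map, hlen]
  have hidxkeys : index.keys = PySem.Set.ofList
      (((List.range sets.length).flatMap (fun i =>
        (sets.getD i []).map (fun v => (v, (i : Int))))).map (fun q => q.1)) := by
    rw [hindex, PySem.Dict.keys_foldl_modify_key _ (fun (q : String × Int) => q.1) []
      (fun _ q => fun l => l ++ [q.2]) PySem.Dict.empty, PySem.Dict.keys_empty,
      PySem.Set.ofList_eq_foldl]
    rfl
  have hidxnd : index.keys.Nodup := by
    rw [hindex]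
    exact PySem.Dict.nodup_keys_foldl_modify_key _ (fun (q : String × Int) => q.1) []
      (fun _ q => fun l => l ++ [q.2]) PySem.Dict.empty
      (by rw [PySem.Dict.keys_empty]; exact List.nodup_nil)
  have hids : ∀ v, index.getD v [] = ((List.range sets.length).filter
      (fun i => decide (v ∈ sets.getD i []))).map (fun (i : Nat) => (i : Int)) := by
    intro v
    rw [hindex, PySem.Dict.getD_foldl_modify_append _ PySem.Dict.empty v, PySem.Dict.getD_empty,
      List.nil_append]
    exact pv_ids_char sets hnodS v
  have hkeymemOf : ∀ (v : String) (i : Nat), i < sets.length → v ∈ sets.getD i [] →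
      v ∈ index.keys := by
    intro v i hi hv
    rw [hidxkeys, PySem.Set.mem_ofList, List.mem_map]
    exact ⟨(v, (i : Int)), List.mem_flatMap.mpr ⟨i, List.mem_range.mpr hi,
      List.mem_map.mpr ⟨v, hv, rfl⟩⟩, rfl⟩
  have hlab : ∀ v, (pvIdxPairs (index.getD v []).length).map (fun q =>
        PySem.List.pyGetD nm ((index.getD v []).getD q.1 0) "" ++ "-" ++
        PySem.List.pyGetD nm ((index.getD v []).getD q.2 0) "")
      = (pvPairsOf ((List.range sets.length).filter (fun i => decide (v ∈ sets.getD i [])))).map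
          (fun p => nm.getD p.1 "" ++ "-" ++ nm.getD p.2 "") := by
    intro v
    rw [hids v]
    simp only [List.length_map]
    rw [← pv_idxPairs_map_getD ((List.range sets.length).filter
        (fun i => decide (v ∈ sets.getD i []))) 0, List.map_map]
    apply List.map_congr_left
    intro q _
    have h0 : (0 : Int) = ((0 : Nat) : Int) := rfl
    rw [h0, List.getD_map, List.getD_map, PySem.List.pyGetD_natCast, PySem.List.pyGetD_natCast]
    rfl
  have hsort : ∀ v, ((List.range sets.length).filter
      (fun i => decide (v ∈ sets.getD i []))).Pairwise (· < ·) :=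
    fun v => List.Pairwise.sublist List.filter_sublist List.pairwise_lt_range
  have hmemN : ∀ v (q : Nat × Nat),
      q ∈ pvPairsOf ((List.range sets.length).filter (fun i => decide (v ∈ sets.getD i []))) →
      q ∈ pvIdxPairs nm.length := by
    intro v q hq
    obtain ⟨h1, h2, h3⟩ := pv_mem_pairsOf _ (hsort v) q hq
    have hb : q.2 < sets.length := List.mem_range.mp (List.mem_of_mem_filter h2)
    exact (pv_mem_idxPairs nm.length q).mpr ⟨h3, by omega⟩
  have hocc0items : occ0.items = (pvIdxPairs nm.length).map (fun p =>
      (nm.getD p.1 "" ++ "-" ++ nm.getD p.2 "", (0 : Int))) := by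
    rw [hocc0, PySem.Dict.items_foldl_insert_fresh (pvIdxPairs nm.length)
      (fun p => nm.getD p.1 "" ++ "-" ++ nm.getD p.2 "") (fun _ => (0 : Int))
      PySem.Dict.empty (fun a _ => PySem.Dict.contains_empty _) hlblnd, hempty, List.nil_append]
  have hocc0keys : occ0.keys
      = (pvIdxPairs nm.length).map (fun p => nm.getD p.1 "" ++ "-" ++ nm.getD p.2 "") := by
    have hk : occ0.keys = occ0.items.map (fun x => x.1) := rfl
    rw [hk, hocc0items, List.map_map]
    rfl
  have hocc0nd : occ0.keys.Nodup := by rw [hocc0keys]; exact hlblnd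
  have hMsub : ∀ x ∈ M, x ∈ occ0.keys := by
    intro x hx
    rw [hM] at hx
    obtain ⟨ids, hids_mem, hx2⟩ := List.mem_flatMap.mp hx
    rw [PySem.Dict.values_eq_map_keys index hidxnd ([] : List Int)] at hids_mem
    obtain ⟨v, hv, rfl⟩ := List.mem_map.mp hids_mem
    rw [hlab v] at hx2
    obtain ⟨q, hq, rfl⟩ := List.mem_map.mp hx2
    rw [hocc0keys]
    exact List.mem_map.mpr ⟨q, hmemN v q hq, rfl⟩
  have hkeysF : (M.foldl (fun occ k => occ.modify k 0 (fun c => c + 1)) occ0).keys = occ0.keys := by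
    rw [PySem.Dict.keys_foldl_modify M 0 (fun _ _ => fun c => c + 1) occ0]
    exact pv_set_update_eq_self occ0.keys M hMsub
  rw [PySem.Dict.items_eq_map_keys _ (by rw [hkeysF]; exact hocc0nd) (0 : Int), hkeysF, hocc0keys,
    List.map_map]
  apply List.map_congr_left
  intro p hp
  obtain ⟨hij, hjn⟩ := (pv_mem_idxPairs nm.length p).mp hp
  have hb1 : p.1 < sets.length := by omega
  have hb2 : p.2 < sets.length := by omega
  simp only [Function.comp_def]
  rw [Prod.mk.injEq]
  refine ⟨rfl, ?_⟩
  have hv0 : occ0.getD (nm.getD p.1 "" ++ "-" ++ nm.getD p.2 "") 0 = 0 :=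
    PySem.Dict.getD_of_mem_items occ0
      (by rw [hocc0items]; exact List.mem_map.mpr ⟨p, hp, rfl⟩) hocc0nd 0
  rw [PySem.Dict.getD_foldl_modify_add_one M occ0 _, hv0, zero_add]
  have hcnt : M.count (nm.getD p.1 "" ++ "-" ++ nm.getD p.2 "")
      = index.keys.countP (fun v => decide (v ∈ sc.getD p.1 []) && decide (v ∈ sc.getD p.2 [])) := by
    rw [hM, List.count_flatMap,
      PySem.Dict.values_eq_map_keys index hidxnd ([] : List Int), List.map_map,
      ← pv_sum_ite_one_zero index.keys
        (fun v => decide (v ∈ sc.getD p.1 []) && decide (v ∈ sc.getD p.2 []))]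
    congr 1
    apply List.map_congr_left
    intro v _
    simp only [Function.comp_def]
    rw [hlab v]
    have hinj : ∀ q ∈ pvPairsOf ((List.range sets.length).filter
        (fun i => decide (v ∈ sets.getD i []))),
        (fun p => nm.getD p.1 "" ++ "-" ++ nm.getD p.2 "") q
          = (fun p => nm.getD p.1 "" ++ "-" ++ nm.getD p.2 "") p → q = p := by
      intro q hq heq
      exact List.inj_on_of_nodup_map hlblnd (hmemN v q hq) hp heq
    rw [pv_count_map_eq _ _ p hinj, pv_count_pairsOf _ (hsort v) p.1 p.2 hij]
    have hmem : ∀ i : Nat, i < sets.length →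
        (i ∈ (List.range sets.length).filter (fun j => decide (v ∈ sets.getD j []))
          ↔ v ∈ sc.getD i []) := by
      intro i hi
      simp only [List.mem_filter, List.mem_range, decide_eq_true_eq]
      rw [hS i, PySem.Set.mem_ofList]
      exact ⟨fun h => h.2, fun h => ⟨hi, h⟩⟩
    have hcond : (p.1 ∈ (List.range sets.length).filter (fun j => decide (v ∈ sets.getD j []))
          ∧ p.2 ∈ (List.range sets.length).filter (fun j => decide (v ∈ sets.getD j [])))
        ↔ ((decide (v ∈ sc.getD p.1 []) && decide (v ∈ sc.getD p.2 [])) = true) := by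
      rw [hmem p.1 hb1, hmem p.2 hb2]
      simp
    rw [if_congr hcond rfl rfl]
  rw [hcnt]
  have hlen2 : index.keys.countP (fun v => decide (v ∈ sc.getD p.1 []) && decide (v ∈ sc.getD p.2 []))
      = (PySem.Set.inter (PySem.Set.ofList (sc.getD p.1 [])) (sc.getD p.2 [])).length := by
    rw [List.countP_eq_length_filter]
    apply List.Perm.length_eq
    simp only [PySem.Set.inter, PySem.Set.contains]
    rw [List.perm_ext_iff_of_nodup (List.Nodup.filter _ hidxnd)
      (List.Nodup.filter _ (PySem.Set.nodup_ofList _))]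
    intro v
    simp only [List.mem_filter, PySem.Set.mem_ofList, Bool.and_eq_true, decide_eq_true_eq,
      List.contains_iff_mem]
    constructor
    · rintro ⟨-, h1, h2⟩
      exact ⟨h1, h2⟩
    · rintro ⟨h1, h2⟩
      have hvk : v ∈ index.keys := by
        apply hkeymemOf v p.1 hb1
        rw [hS p.1, PySem.Set.mem_ofList]
        exact h1
      exact ⟨hvk, h1, h2⟩
  rw [hlen2]
  rfl

-- ===== VERDICT =====
theorem office_occurrency_spec : Claim_equal_office_occurrency := by
  intro dictionary _hDom hPre
  show office_occurrency dictionary = office_occurrency_alt dictionary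
  exact pv_core (PySem.Dict.keys (PySem.Dict.ofList dictionary))
    (PySem.Dict.values (PySem.Dict.ofList dictionary))
    (by simp [PySem.Dict.keys, PySem.Dict.values]) hPre
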